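-- pv_equiv track=rewrite | github.com/vchub/daily-python | problems/test_buildings1.py | new_max_right
-- ===== SOURCE A (Python) =====
-- from typing import List
--
-- def new_max_right(xs: List[int]) -> int:
--     if not xs:
--         return 0
--     t = 1
--     m = xs[-1]
--     for i in range(len(xs) - 2, -1, -1):
--         if xs[i] > m:
--             m = xs[i]
--             t += 1
--     return t
-- ===== SOURCE B (Python) =====
-- from typing import List
--
-- def new_max_right(xs: List[int]) -> int:
--     # Head-vs-tail decomposition: repeatedly detach the current head and count
--     # it iff it beats the best of the remaining elements; no running maximum
--     # is carried along, the tail's max is recomputed each round.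
--     t = 0
--     rest = list(xs)
--     while rest:
--         head = rest.pop(0)
--         if not rest or head > max(rest):
--             t += 1
--     return t
-- ===== Notes on version B (the rewrite author's own statement) =====
-- stated objective: alternative
-- what changed: Replaces A's right-to-left running-maximum scan with a head-vs-tail decomposition: detach the head, count it iff it beats every remaining element, and continue on the tail (no maximum is maintained).
import Mathlib
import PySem

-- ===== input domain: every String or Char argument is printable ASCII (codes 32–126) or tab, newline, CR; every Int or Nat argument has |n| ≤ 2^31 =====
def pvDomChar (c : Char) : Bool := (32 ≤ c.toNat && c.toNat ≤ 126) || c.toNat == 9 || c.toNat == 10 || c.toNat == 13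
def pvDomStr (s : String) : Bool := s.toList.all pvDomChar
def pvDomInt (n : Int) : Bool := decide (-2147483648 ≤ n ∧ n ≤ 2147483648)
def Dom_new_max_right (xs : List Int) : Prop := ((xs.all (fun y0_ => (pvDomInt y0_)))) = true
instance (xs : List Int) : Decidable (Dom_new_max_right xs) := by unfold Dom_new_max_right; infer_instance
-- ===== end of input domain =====

-- B replaces A's right-to-left running-maximum loop by a structural recursion
-- counting each head that beats all later elements (alternative decomposition).

-- ===== PORT A =====
def new_max_right (xs : List Int) : Int :=
  if xs = [] then 0
  else
    let n : Int := xs.length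
    -- state (m, t): m = running max, t = count; loop over range(len(xs)-2, -1, -1)
    let st := (PySem.List.pyRange (n - 2) (-1) (-1)).foldl
      (fun (st : Int × Int) i =>
        let xi := PySem.List.pyGetD xs i 0
        if xi > st.1 then (xi, st.2 + 1) else st)
      (PySem.List.pyGetD xs (-1) 0, 1)
    st.2

-- ===== PORT B =====
-- the while-loop over (t, rest) with rest.pop(0), as structural recursion on rest
def pvGo (t : Int) : List Int → Int
  | [] => t
  | head :: rest =>
      let ok : Bool :=               -- 'not rest or head > max(rest)'
        match PySem.List.max? rest (fun y => y) with
        | none => true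
        | some m => decide (m < head)
      pvGo (if ok then t + 1 else t) rest

def new_max_right_alt (xs : List Int) : Int := pvGo 0 xs

-- ===== PRECONDITION & SPEC =====
def Spec_new_max_right (xs : List Int) (out : Int) : Prop := out = new_max_right_alt xs
instance (xs : List Int) (out : Int) : Decidable (Spec_new_max_right xs out) := by unfold Spec_new_max_right; infer_instance

-- ===== CLAIM (what is proved, stated in full; the proofs are below) =====
def Claim_equal_new_max_right : Prop := ∀ (xs : List Int), Dom_new_max_right xs → Spec_new_max_right xs (new_max_right xs)

-- ===== LEMMAS AND PROOFS =====

-- A's loop body, seen as a step over the element values (right-to-left order)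
def pvStep (st : Int × Int) (x : Int) : Int × Int :=
  if x > st.1 then (x, st.2 + 1) else st

-- B's count, restated without the accumulator
def pvCnt : List Int → Int
  | [] => 0
  | x :: rest => (if rest.all (fun y => decide (y < x)) then 1 else 0) + pvCnt rest

-- 'head > max(rest)' (with empty rest counting) is exactly 'head beats every tail element'
theorem pvCond (head : Int) (rest : List Int) :
    (match PySem.List.max? rest (fun y => y) with
      | none => true
      | some m => decide (m < head))
      = rest.all (fun y => decide (y < head)) := by
  cases hm : PySem.List.max? rest (fun y => y) with
  | none =>
    rw [PySem.List.max?_eq_none_iff] at hm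
    simp [hm]
  | some m =>
    by_cases h : m < head
    · have hle := PySem.List.max?_isMax hm
      have : rest.all (fun y => decide (y < head)) = true := by
        simp only [List.all_eq_true, decide_eq_true_eq]
        intro y hy; exact lt_of_le_of_lt (hle y hy) h
      simp [h, this]
    · have hmem := PySem.List.max?_mem hm
      have : rest.all (fun y => decide (y < head)) = false := by
        simp only [List.all_eq_false, decide_eq_true_eq, not_lt]
        exact ⟨m, hmem, by omega⟩
      simp [h, this]

theorem pvGo_eq (l : List Int) : ∀ t : Int, pvGo t l = t + pvCnt l := by
  induction l with
  | nil => intro t; simp [pvGo, pvCnt]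
  | cons x rest ih =>
    intro t
    simp only [pvGo, pvCnt, ih, pvCond]
    split <;> omega

theorem alt_eq_pvCnt (xs : List Int) : new_max_right_alt xs = pvCnt xs := by
  simp [new_max_right_alt, pvGo_eq]

-- Invariant of A's right-to-left scan started at last element l: after consuming
-- the front part ys, the state is (a max of ys ++ [l], B's count of ys ++ [l]).
theorem pvFoldrInv (ys : List Int) (l : Int) :
    (∀ z ∈ ys ++ [l], z ≤ (ys.foldr (fun x st => pvStep st x) (l, 1)).1) ∧
    (ys.foldr (fun x st => pvStep st x) (l, 1)).1 ∈ ys ++ [l] ∧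
    (ys.foldr (fun x st => pvStep st x) (l, 1)).2 = pvCnt (ys ++ [l]) := by
  induction ys with
  | nil => simp [pvCnt]
  | cons y t ih =>
    obtain ⟨hmax, hmem, hcnt⟩ := ih
    simp only [List.foldr_cons]
    set st := t.foldr (fun x st => pvStep st x) (l, 1) with hst
    refine ⟨?_, ?_, ?_⟩
    · intro z hz
      simp only [List.cons_append, List.mem_cons] at hz
      unfold pvStep
      rcases hz with rfl | hz
      · split <;> omega
      · have := hmax z hz
        split <;> omega
    · simp only [List.cons_append]
      unfold pvStep
      split
      · exact List.mem_cons_self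
      · exact List.mem_cons_of_mem _ hmem
    · simp only [List.cons_append, pvCnt, ← hcnt]
      unfold pvStep
      by_cases h : y > st.1
      · have hall : (t ++ [l]).all (fun z => decide (z < y)) = true := by
          simp only [List.all_eq_true, decide_eq_true_eq]
          intro z hz; exact lt_of_le_of_lt (hmax z hz) h
        rw [if_pos h, hall]
        simp; omega
      · have hne : (t ++ [l]).all (fun z => decide (z < y)) = false := by
          simp only [List.all_eq_false, decide_eq_true_eq, not_lt]
          exact ⟨st.1, hmem, by omega⟩
        rw [if_neg h, hne]
        simp

-- range(len(xs)-2, -1, -1) visits exactly the values of xs.dropLast, right to left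
theorem pvMapDropLast (xs : List Int) (h : xs ≠ []) :
    (PySem.List.pyRange 0 ((xs.length : Int) - 1) 1).map (fun i => PySem.List.pyGetD xs i 0)
      = xs.dropLast := by
  have hlen : 1 ≤ xs.length := List.length_pos_of_ne_nil h
  apply List.ext_getElem
  · simp [PySem.List.length_pyRange_one]
  · intro k hk1 hk2
    simp only [List.getElem_map, PySem.List.getElem_pyRange_one, zero_add]
    have hk : k < xs.length - 1 := by
      simpa [PySem.List.length_pyRange_one] using hk1
    rw [show ((k : Int)) = ((k : Nat) : Int) from rfl, PySem.List.pyGetD_natCast]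
    rw [List.getElem_dropLast]
    exact (List.getD_eq_getElem xs 0 (by omega)).trans (by simp)

-- ===== VERDICT (by name: the statement is the Claim_ definition above) =====
theorem new_max_right_spec : Claim_equal_new_max_right := by
  intro xs _
  unfold Spec_new_max_right new_max_right
  by_cases h : xs = []
  · subst h; simp [new_max_right_alt, pvGo]
  · rw [if_neg h]
    have hlen : 1 ≤ xs.length := List.length_pos_of_ne_nil h
    have hrange : PySem.List.pyRange ((xs.length : Int) - 2) (-1) (-1)
        = (PySem.List.pyRange 0 ((xs.length : Int) - 1) 1).reverse := by
      rw [PySem.List.pyRange_neg_one_eq_reverse,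
        show ((-1 : Int) + 1) = 0 from rfl,
        show ((xs.length : Int) - 2 + 1) = (xs.length : Int) - 1 by ring]
    have hlast : PySem.List.pyGetD xs (-1) 0 = xs.getLast h := by
      unfold PySem.List.pyGetD
      rw [PySem.List.pyGet?_neg_one, List.getLast?_eq_some_getLast h]
      rfl
    have hmap := pvMapDropLast xs h
    have hfold : (PySem.List.pyRange 0 ((xs.length : Int) - 1) 1).foldr
        (fun i st => pvStep st (PySem.List.pyGetD xs i 0)) (xs.getLast h, 1)
        = xs.dropLast.foldr (fun x st => pvStep st x) (xs.getLast h, 1) := by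
      rw [← hmap, List.foldr_map]
    simp only [hrange, hlast, List.foldl_reverse]
    simp only [pvStep] at hfold
    rw [hfold]
    have hinv := (pvFoldrInv xs.dropLast (xs.getLast h)).2.2
    rw [List.dropLast_concat_getLast h] at hinv
    rw [alt_eq_pvCnt]
    simpa [pvStep] using hinv
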